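-- pv_equiv track=rewrite | github.com/yofn/pyacm | codeforces/math数学/1100/946B减法状态机.py | f
-- ===== SOURCE A (Python) =====
-- def f(l):
--     a,b = l
--     while True:
--         if 0 in [a,b]:
--             return [a,b]
--         if   a>=(b<<1):
--             a = a%(b<<1)
--         elif b>=(a<<1):
--             b = b%(a<<1)
--         else:
--             return [a,b]
-- ===== SOURCE B (Python) =====
-- def _reduce(a, b):
--     if a == 0 or b == 0:
--         return (a, b)
--     if a >= 2 * b:
--         return _reduce(a % (2 * b), b)
--     if b >= 2 * a:
--         return _reduce(a, b % (2 * a))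
--     return (a, b)
--
-- def f(l):
--     a, b = l
--     return list(_reduce(a, b))
-- ===== Notes on version B (the rewrite author's own statement) =====
-- stated objective: alternative
-- what changed: The while-True loop with mutable state is replaced by a pure tail-recursive helper _reduce returning a tuple, with explicit base cases instead of in-loop returns.
import Mathlib
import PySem

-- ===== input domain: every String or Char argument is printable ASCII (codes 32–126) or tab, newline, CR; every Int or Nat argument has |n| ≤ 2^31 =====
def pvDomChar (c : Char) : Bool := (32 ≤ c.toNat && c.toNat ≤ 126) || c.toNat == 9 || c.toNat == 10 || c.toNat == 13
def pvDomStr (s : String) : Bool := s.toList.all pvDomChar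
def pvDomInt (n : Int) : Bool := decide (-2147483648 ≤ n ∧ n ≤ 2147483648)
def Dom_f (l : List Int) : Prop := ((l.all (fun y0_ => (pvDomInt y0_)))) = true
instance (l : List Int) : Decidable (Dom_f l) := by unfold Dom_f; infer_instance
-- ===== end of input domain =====

-- B replaces A's while-True loop with mutable state by a pure tail-recursive helper
-- returning a tuple (objective: alternative decomposition; same asymptotic cost).

-- ===== PORT A =====
-- A's `while True` loop over the mutable pair (a, b); fuel only makes the loop total
-- (a.toNat + b.toNat + 1 steps suffice on Pre_, where each reducing step strictly
-- decreases the reduced component).  `b << 1` is `b * 2` for Python ints.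
def fWhile : Nat → Int → Int → List Int
  | 0, a, b => [a, b]
  | fuel + 1, a, b =>
    if 0 ∈ ([a, b] : List Int) then [a, b]
    else if a ≥ b * 2 then fWhile fuel (PySem.Int.mod a (b * 2)) b
    else if b ≥ a * 2 then fWhile fuel a (PySem.Int.mod b (a * 2))
    else [a, b]

def f (l : List Int) : List Int :=
  match l with
  | [a, b] => fWhile (a.toNat + b.toNat + 1) a b
  | _ => []  -- `a, b = l` raises ValueError here (outside Pre_f)

-- ===== PORT B =====
-- Source B's tail-recursive _reduce; the same fuel guard makes the recursion total
-- (on inputs outside Pre_f the Python recursion can hit RecursionError).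
def fReduce : Nat → Int → Int → Int × Int
  | 0, a, b => (a, b)
  | fuel + 1, a, b =>
    if a = 0 ∨ b = 0 then (a, b)
    else if a ≥ 2 * b then fReduce fuel (PySem.Int.mod a (2 * b)) b
    else if b ≥ 2 * a then fReduce fuel a (PySem.Int.mod b (2 * a))
    else (a, b)

def f_alt (l : List Int) : List Int :=
  if l.length = 2 then
    let a := l.headD 0
    let b := l.tail.headD 0
    let p := fReduce (a.toNat + b.toNat + 1) a b
    [p.1, p.2]
  else []  -- `a, b = l` raises ValueError here (outside Pre_f)

-- ===== PRECONDITION & SPEC =====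
-- Pre_f excludes lists whose length is not 2, on which A raises ValueError when
-- unpacking, and the length-2 lists on which A's loop never terminates (a modulo
-- step with a negative divisor that leaves the pair unchanged); the disjunction
-- below is exactly A's termination set for each sign pattern of (a, b).
def Pre_f (l : List Int) : Prop :=
  l.length = 2 ∧
  (let a := l.headD 0
   let b := l.tail.headD 0
   a = 0 ∨ b = 0 ∨ (0 < a ∧ 0 < b) ∨
   (a < 0 ∧ b < 0 ∧ (if a ≥ 2 * b then a = 2 * b else b = 2 * a)) ∨
   (0 < a ∧ b < 0 ∧ PySem.Int.mod a (2 * b) = 0) ∨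
   (a < 0 ∧ 0 < b ∧ (PySem.Int.mod b (2 * a) = 0 ∨ a = 2 * PySem.Int.mod b (2 * a))))
instance (l : List Int) : Decidable (Pre_f l) := by unfold Pre_f; infer_instance
def pvWitness_f : List Int := [7, 3]

def Spec_f (l : List Int) (out : List Int) : Prop := out = f_alt l
instance (l : List Int) (out : List Int) : Decidable (Spec_f l out) := by unfold Spec_f; infer_instance

-- ===== CLAIM (what is proved, stated in full; the proofs are below) =====
def Claim_equal_f : Prop := ∀ (l : List Int), Dom_f l → Pre_f l → Spec_f l (f l)

-- ===== LEMMAS AND PROOFS =====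

-- The loop body of A and the recursion of B perform identical state steps, so with
-- the same fuel they compute the same pair, for every starting state.
lemma fWhile_eq_fReduce (n : Nat) : ∀ a b : Int,
    fWhile n a b = [(fReduce n a b).1, (fReduce n a b).2] := by
  induction n with
  | zero => intro a b; simp [fWhile, fReduce]
  | succ n ih =>
    intro a b
    simp only [fWhile, fReduce, List.mem_cons, List.not_mem_nil, or_false]
    by_cases h0 : a = 0 ∨ b = 0
    · have h0' : 0 = a ∨ 0 = b := by omega
      simp [h0, h0']
    · have h0' : ¬ (0 = a ∨ 0 = b) := by omega
      simp only [h0, h0', if_false]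
      by_cases h1 : a ≥ 2 * b
      · have h1' : a ≥ b * 2 := by omega
        rw [if_pos h1', if_pos h1, mul_comm b 2, ih]
      · have h1' : ¬ a ≥ b * 2 := by omega
        rw [if_neg h1', if_neg h1]
        by_cases h2 : b ≥ 2 * a
        · have h2' : b ≥ a * 2 := by omega
          rw [if_pos h2', if_pos h2, mul_comm a 2, ih]
        · have h2' : ¬ b ≥ a * 2 := by omega
          rw [if_neg h2', if_neg h2]

-- ===== VERDICT (by name: the statement is the Claim_ definition above) =====
theorem f_spec : Claim_equal_f := by
  intro l _ hpre
  obtain ⟨hlen, _⟩ := hpre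
  match l, hlen with
  | [a, b], _ =>
    show f [a, b] = f_alt [a, b]
    simp only [f, f_alt, List.length_cons, List.length_nil, List.headD, List.tail]
    norm_num
    exact fWhile_eq_fReduce _ a b
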